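-- pv_equiv track=rewrite | github.com/MethodsDev/LongReadAlignmentAssembler | util/separate_bam_by_strand.py | majority_vote_intron_orient
-- ===== SOURCE A (Python) =====
-- def majority_vote_intron_orient(intron_coordsets, contig_seq):
--
--     splice_dinucs_top_strand = {"GTAG", "GCAG", "ATAC"}
--     splice_dinucs_bottom_strand = {
--         "CTAC",
--         "CTGC",
--         "GTAT",
--     }  # revcomp of top strand dinucs
--
--     orient_counts = {"+": 0, "-": 0}
--
--     for intron_coordset in intron_coordsets:
--         intron_lend, intron_rend = intron_coordset
--         dinuc_left = contig_seq[intron_lend - 1] + contig_seq[intron_lend - 1 + 1]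
--         dinuc_right = contig_seq[intron_rend - 1 - 1] + contig_seq[intron_rend - 1]
--         dinuc_combo = dinuc_left + dinuc_right
--
--         if dinuc_combo in splice_dinucs_top_strand:
--             orient_counts["+"] += 1
--         elif dinuc_combo in splice_dinucs_bottom_strand:
--             orient_counts["-"] += 1
--
--     # check tie or not match
--     if orient_counts["+"] == orient_counts["-"]:
--         return "?"
--     elif orient_counts["+"] > orient_counts["-"]:
--         return "+"
--     else:
--         return "-"
-- ===== SOURCE B (Python) =====
-- TOP = ("GTAG", "GCAG", "ATAC")
-- BOTTOM = ("CTAC", "CTGC", "GTAT")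
--
--
-- def majority_vote_intron_orient(intron_coordsets, contig_seq):
--     # stage 1: materialize every splice-boundary dinucleotide combo
--     combos = [
--         contig_seq[lend - 1] + contig_seq[lend] + contig_seq[rend - 2] + contig_seq[rend - 1]
--         for lend, rend in intron_coordsets
--     ]
--     # stage 2: frequency table of the combos (no per-intron membership test)
--     freq = {}
--     for c in combos:
--         freq[c] = freq.get(c, 0) + 1
--     # stage 3: aggregate the six known splice keys from the table
--     plus = sum(freq.get(k, 0) for k in TOP)
--     minus = sum(freq.get(k, 0) for k in BOTTOM)
--     if plus > minus:
--         return "+"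
--     if minus > plus:
--         return "-"
--     return "?"
-- ===== Notes on version B (the rewrite author's own statement) =====
-- stated objective: alternative
-- what changed: Instead of A's single pass that tests each combo against two sets and keeps two running counters, B works in three stages: it materializes the list of dinucleotide combos, builds a frequency table over them once, and then aggregates the vote by looking up the six fixed splice keys in the table, comparing the two sums at the end.
import Mathlib
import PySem

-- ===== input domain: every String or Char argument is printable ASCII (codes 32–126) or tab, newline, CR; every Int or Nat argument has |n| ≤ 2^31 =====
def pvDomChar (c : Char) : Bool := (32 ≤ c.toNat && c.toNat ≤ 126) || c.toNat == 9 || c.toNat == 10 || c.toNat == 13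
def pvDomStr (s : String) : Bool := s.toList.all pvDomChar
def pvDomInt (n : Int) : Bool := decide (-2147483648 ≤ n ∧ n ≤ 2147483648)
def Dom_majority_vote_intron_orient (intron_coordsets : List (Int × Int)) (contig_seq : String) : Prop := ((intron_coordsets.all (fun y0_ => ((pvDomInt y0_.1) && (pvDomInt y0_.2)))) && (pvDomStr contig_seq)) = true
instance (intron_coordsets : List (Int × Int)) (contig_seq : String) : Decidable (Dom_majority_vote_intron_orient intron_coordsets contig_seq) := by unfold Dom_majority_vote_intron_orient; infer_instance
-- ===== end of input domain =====

-- B restages A's one-pass two-counter vote as: materialize the combo list, build a frequency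
-- table over it, then aggregate the six fixed splice keys; objective: alternative decomposition.

-- ===== PORT A =====
-- Python strings are handled as List Char; the '+' concatenations of the four looked-up
-- characters form the list [a, b, c, d].  The two Python set literals, ported as PySem.Set.
def pvTopStrand : PySem.Set (List Char) :=
  PySem.Set.ofList [['G','T','A','G'], ['G','C','A','G'], ['A','T','A','C']]
def pvBottomStrand : PySem.Set (List Char) :=
  PySem.Set.ofList [['C','T','A','C'], ['C','T','G','C'], ['G','T','A','T']]

-- one iteration of A's for-loop over the counter pair (orient_counts["+"], orient_counts["-"]);
-- on an out-of-range index Python raises IndexError (excluded by Pre_): the fold leaves the state.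
def pvStepA (contig_seq : String) (oc : Int × Int) (ic : Int × Int) : Int × Int :=
  match PySem.Str.pyGet? contig_seq (ic.1 - 1), PySem.Str.pyGet? contig_seq (ic.1 - 1 + 1),
        PySem.Str.pyGet? contig_seq (ic.2 - 1 - 1), PySem.Str.pyGet? contig_seq (ic.2 - 1) with
  | some a, some b, some c, some d =>
      let dinuc_left := [a, b]
      let dinuc_right := [c, d]
      let dinuc_combo := dinuc_left ++ dinuc_right
      if dinuc_combo ∈ pvTopStrand then (oc.1 + 1, oc.2)
      else if dinuc_combo ∈ pvBottomStrand then (oc.1, oc.2 + 1)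
      else oc
  | _, _, _, _ => oc

def majority_vote_intron_orient (intron_coordsets : List (Int × Int)) (contig_seq : String) : String :=
  let orient_counts := intron_coordsets.foldl (pvStepA contig_seq) (0, 0)
  if orient_counts.1 = orient_counts.2 then "?"
  else if orient_counts.1 > orient_counts.2 then "+"
  else "-"

-- ===== PORT B =====
-- stage 1 of Source B: one combo per intron; an IndexError (outside Pre_) yields none and is skipped.
def pvExtract (contig_seq : String) (ic : Int × Int) : Option (List Char) :=
  match PySem.Str.pyGet? contig_seq (ic.1 - 1), PySem.Str.pyGet? contig_seq ic.1,
        PySem.Str.pyGet? contig_seq (ic.2 - 2), PySem.Str.pyGet? contig_seq (ic.2 - 1) with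
  | some a, some b, some c, some d => some [a, b, c, d]
  | _, _, _, _ => none

def majority_vote_intron_orient_alt (intron_coordsets : List (Int × Int)) (contig_seq : String) : String :=
  let combos := intron_coordsets.filterMap (pvExtract contig_seq)
  -- stage 2 of Source B: freq[c] = freq.get(c, 0) + 1
  let freq := combos.foldl (fun d c => d.insert c (d.getD c 0 + 1)) (PySem.Dict.empty : PySem.Dict (List Char) Int)
  -- stage 3 of Source B: sum the six fixed keys
  let plus := freq.getD ['G','T','A','G'] 0 + freq.getD ['G','C','A','G'] 0 + freq.getD ['A','T','A','C'] 0
  let minus := freq.getD ['C','T','A','C'] 0 + freq.getD ['C','T','G','C'] 0 + freq.getD ['G','T','A','T'] 0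
  if plus > minus then "+"
  else if minus > plus then "-"
  else "?"

-- ===== PRECONDITION & SPEC =====
-- Pre_ excludes exactly the inputs on which Python A raises IndexError: for each intron
-- coordinate pair, the four looked-up indices must be in Python range of the contig sequence.
def Pre_majority_vote_intron_orient (intron_coordsets : List (Int × Int)) (contig_seq : String) : Prop :=
  ∀ ic ∈ intron_coordsets,
    PySem.Raise.InRange contig_seq.toList.length (ic.1 - 1) ∧
    PySem.Raise.InRange contig_seq.toList.length ic.1 ∧
    PySem.Raise.InRange contig_seq.toList.length (ic.2 - 2) ∧
    PySem.Raise.InRange contig_seq.toList.length (ic.2 - 1)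
instance (intron_coordsets : List (Int × Int)) (contig_seq : String) : Decidable (Pre_majority_vote_intron_orient intron_coordsets contig_seq) := by unfold Pre_majority_vote_intron_orient; infer_instance

def pvWitness_majority_vote_intron_orient : (List (Int × Int)) × String := ([(1, 4)], "GTAG")

def Spec_majority_vote_intron_orient (intron_coordsets : List (Int × Int)) (contig_seq : String) (out : String) : Prop := out = majority_vote_intron_orient_alt intron_coordsets contig_seq
instance (intron_coordsets : List (Int × Int)) (contig_seq : String) (out : String) : Decidable (Spec_majority_vote_intron_orient intron_coordsets contig_seq out) := by unfold Spec_majority_vote_intron_orient; infer_instance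

-- ===== CLAIM (what is proved, stated in full; the proofs are below) =====
def Claim_equal_majority_vote_intron_orient : Prop := ∀ (intron_coordsets : List (Int × Int)) (contig_seq : String), Dom_majority_vote_intron_orient intron_coordsets contig_seq → Pre_majority_vote_intron_orient intron_coordsets contig_seq → Spec_majority_vote_intron_orient intron_coordsets contig_seq (majority_vote_intron_orient intron_coordsets contig_seq)

-- ===== LEMMAS AND PROOFS =====

-- sums of counts of the three top / bottom keys in a combo list
def pvPlusOf (l : List (List Char)) : Int :=
  (l.count ['G','T','A','G'] : Int) + (l.count ['G','C','A','G'] : Int) + (l.count ['A','T','A','C'] : Int)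
def pvMinusOf (l : List (List Char)) : Int :=
  (l.count ['C','T','A','C'] : Int) + (l.count ['C','T','G','C'] : Int) + (l.count ['G','T','A','T'] : Int)

-- A's fold accumulates exactly the key-count sums over the extracted combo list.
lemma pvFoldA_counts (contig_seq : String) (xs : List (Int × Int)) (p m : Int)
    (h : ∀ ic ∈ xs,
      PySem.Raise.InRange contig_seq.toList.length (ic.1 - 1) ∧
      PySem.Raise.InRange contig_seq.toList.length ic.1 ∧
      PySem.Raise.InRange contig_seq.toList.length (ic.2 - 2) ∧
      PySem.Raise.InRange contig_seq.toList.length (ic.2 - 1)) :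
    xs.foldl (pvStepA contig_seq) (p, m) =
      (p + pvPlusOf (xs.filterMap (pvExtract contig_seq)),
       m + pvMinusOf (xs.filterMap (pvExtract contig_seq))) := by
  induction xs generalizing p m with
  | nil => simp [pvPlusOf, pvMinusOf]
  | cons ic t ih =>
      obtain ⟨h1, h2, h3, h4⟩ := h ic (List.mem_cons_self ..)
      have ht := fun ic hm => h ic (List.mem_cons_of_mem _ hm)
      obtain ⟨a, ha⟩ : ∃ a, PySem.Str.pyGet? contig_seq (ic.1 - 1) = some a := by
        rcases hx : PySem.Str.pyGet? contig_seq (ic.1 - 1) with _ | a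
        · exact absurd h1 (by
            have hn : PySem.List.pyGet? contig_seq.toList (ic.1 - 1) = none := by
              simpa [PySem.Str.pyGet?] using hx
            exact (PySem.List.pyGet?_eq_none_iff _ _).mp hn)
        · exact ⟨a, rfl⟩
      obtain ⟨b, hb⟩ : ∃ b, PySem.Str.pyGet? contig_seq ic.1 = some b := by
        rcases hx : PySem.Str.pyGet? contig_seq ic.1 with _ | b
        · exact absurd h2 (by
            have hn : PySem.List.pyGet? contig_seq.toList ic.1 = none := by
              simpa [PySem.Str.pyGet?] using hx
            exact (PySem.List.pyGet?_eq_none_iff _ _).mp hn)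
        · exact ⟨b, rfl⟩
      obtain ⟨c, hc⟩ : ∃ c, PySem.Str.pyGet? contig_seq (ic.2 - 2) = some c := by
        rcases hx : PySem.Str.pyGet? contig_seq (ic.2 - 2) with _ | c
        · exact absurd h3 (by
            have hn : PySem.List.pyGet? contig_seq.toList (ic.2 - 2) = none := by
              simpa [PySem.Str.pyGet?] using hx
            exact (PySem.List.pyGet?_eq_none_iff _ _).mp hn)
        · exact ⟨c, rfl⟩
      obtain ⟨d, hd⟩ : ∃ d, PySem.Str.pyGet? contig_seq (ic.2 - 1) = some d := by
        rcases hx : PySem.Str.pyGet? contig_seq (ic.2 - 1) with _ | d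
        · exact absurd h4 (by
            have hn : PySem.List.pyGet? contig_seq.toList (ic.2 - 1) = none := by
              simpa [PySem.Str.pyGet?] using hx
            exact (PySem.List.pyGet?_eq_none_iff _ _).mp hn)
        · exact ⟨d, rfl⟩
      have e2 : ic.1 - 1 + 1 = ic.1 := by ring
      have e3 : ic.2 - 1 - 1 = ic.2 - 2 := by ring
      have hstep : pvStepA contig_seq (p, m) ic =
          (if [a, b, c, d] ∈ pvTopStrand then (p + 1, m)
           else if [a, b, c, d] ∈ pvBottomStrand then (p, m + 1)
           else (p, m)) := by
        unfold pvStepA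
        rw [e2, e3, ha, hb, hc, hd]
        rfl
      have hext : pvExtract contig_seq ic = some [a, b, c, d] := by
        unfold pvExtract; rw [ha, hb, hc, hd]
      simp only [List.foldl_cons, List.filterMap_cons, hext, hstep]
      set rest := t.filterMap (pvExtract contig_seq) with hrest
      by_cases htop : [a, b, c, d] ∈ pvTopStrand
      · simp only [if_pos htop]
        rw [ih _ _ ht]
        simp only [pvTopStrand, PySem.Set.mem_ofList, List.mem_cons, List.not_mem_nil, or_false] at htop
        rcases htop with h | h | h <;>
          (simp only [List.cons.injEq, and_true] at h; obtain ⟨rfl, rfl, rfl, rfl⟩ := h) <;>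
          · simp only [Prod.mk.injEq]
            refine ⟨?_, ?_⟩ <;> (simp [pvPlusOf, pvMinusOf]; try omega)
      · by_cases hbot : [a, b, c, d] ∈ pvBottomStrand
        · simp only [if_neg htop, if_pos hbot]
          rw [ih _ _ ht]
          simp only [pvBottomStrand, PySem.Set.mem_ofList, List.mem_cons, List.not_mem_nil, or_false] at hbot
          rcases hbot with h | h | h <;>
            (simp only [List.cons.injEq, and_true] at h; obtain ⟨rfl, rfl, rfl, rfl⟩ := h) <;>
            · simp only [Prod.mk.injEq]
              refine ⟨?_, ?_⟩ <;> (simp [pvPlusOf, pvMinusOf]; try omega)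
        · simp only [if_neg htop, if_neg hbot]
          rw [ih _ _ ht]
          simp only [pvTopStrand, pvBottomStrand, PySem.Set.mem_ofList, List.mem_cons,
            List.not_mem_nil, or_false, not_or] at htop hbot
          simp only [Prod.mk.injEq]
          refine ⟨?_, ?_⟩ <;>
            simp [pvPlusOf, pvMinusOf, htop.1, htop.2.1, htop.2.2,
              hbot.1, hbot.2.1, hbot.2.2]

-- B's frequency-table aggregation equals the key-count sums.
lemma pvFreq_getD (l : List (List Char)) (k : List Char) :
    (l.foldl (fun d c => d.insert c (d.getD c 0 + 1)) (PySem.Dict.empty : PySem.Dict (List Char) Int)).getD k 0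
      = (l.count k : Int) := by
  rw [PySem.Dict.foldl_insert_getD_add_one_eq_counter, PySem.Dict.getD_counter]

-- ===== VERDICT (by name: the statement is the Claim_ definition above) =====
theorem majority_vote_intron_orient_spec : Claim_equal_majority_vote_intron_orient := by
  intro intron_coordsets contig_seq _ hpre
  unfold Spec_majority_vote_intron_orient majority_vote_intron_orient majority_vote_intron_orient_alt
  rw [pvFoldA_counts contig_seq intron_coordsets 0 0 hpre]
  simp only [pvFreq_getD, pvPlusOf, pvMinusOf, zero_add]
  split_ifs <;> first | rfl | omega
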